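-- pv_equiv track=rewrite | github.com/vosslab/biology-problems | consensus_sequence_easy.py | makeHtmlTable
-- ===== SOURCE A (Python) =====
-- num_sequence = 5 #fixed for easy
--
-- separate = 3
--
-- def colorNucleotide(nt):
-- 	adenine = ' bgcolor="#e6ffe6"' #green
-- 	cytosine = ' bgcolor="#e6f3ff"' #blue
-- 	thymine = ' bgcolor="#ffe6e6"' #red
-- 	guanine = ' bgcolor="#f2f2f2"' #black
-- 	uracil = ' bgcolor="#f3e6ff"' #purple
-- 	if nt == 'A':
-- 		return adenine
-- 	elif nt == 'C':
-- 		return cytosine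
-- 	elif nt == 'G':
-- 		return guanine
-- 	elif nt == 'T':
-- 		return thymine
-- 	elif nt == 'U':
-- 		return thymine
-- 	return ''
--
-- def makeHtmlRow(seq):
-- 	htmlrow = ""
-- 	htmlrow += "<tr>"
-- 	for i in range(len(seq)):
-- 		if i > 0 and i % separate == 0:
-- 			htmlrow += "<td>&nbsp;,&nbsp;</td> "
-- 		nt = seq[i]
-- 		htmlrow += "<td {1}>&nbsp;{0}&nbsp;</td> ".format(nt, colorNucleotide(nt))
-- 	return htmlrow
--
-- def makeHtmlTable(sequence_list):
-- 	table = ""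
-- 	table += '<table style="border-collapse: collapse; border: 1px solid silver;"> '
-- 	table += "<tr> "
-- 	for j in range(num_sequence):
-- 		table += makeHtmlRow(sequence_list[j])
-- 	table += '</tr></table> '
-- 	return table
-- ===== SOURCE B (Python) =====
-- _COLORS = {
--     'A': ' bgcolor="#e6ffe6"',
--     'C': ' bgcolor="#e6f3ff"',
--     'G': ' bgcolor="#f2f2f2"',
--     'T': ' bgcolor="#ffe6e6"',
--     'U': ' bgcolor="#ffe6e6"',
-- }
--
-- def _renderChunk(chunk):
--     return "".join("<td {}>&nbsp;{}&nbsp;</td> ".format(_COLORS.get(nt, ''), nt)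
--                    for nt in chunk)
--
-- def _makeRow(seq):
--     chunks = [seq[k:k + 3] for k in range(0, len(seq), 3)]
--     return "<tr>" + "<td>&nbsp;,&nbsp;</td> ".join(_renderChunk(c) for c in chunks)
--
-- def makeHtmlTable(sequence_list):
--     rows = [_makeRow(sequence_list[j]) for j in range(5)]
--     return ('<table style="border-collapse: collapse; border: 1px solid silver;"> <tr> '
--             + "".join(rows)
--             + '</tr></table> ')
-- ===== Notes on version B (the rewrite author's own statement) =====
-- stated objective: alternative
-- what changed: Each row is built by partitioning the sequence into chunks of 3 and joining the chunks' rendered cells with the separator cell via str.join (and a color dict), instead of A's single index loop with an i % 3 test inserting the separator.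
import Mathlib
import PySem

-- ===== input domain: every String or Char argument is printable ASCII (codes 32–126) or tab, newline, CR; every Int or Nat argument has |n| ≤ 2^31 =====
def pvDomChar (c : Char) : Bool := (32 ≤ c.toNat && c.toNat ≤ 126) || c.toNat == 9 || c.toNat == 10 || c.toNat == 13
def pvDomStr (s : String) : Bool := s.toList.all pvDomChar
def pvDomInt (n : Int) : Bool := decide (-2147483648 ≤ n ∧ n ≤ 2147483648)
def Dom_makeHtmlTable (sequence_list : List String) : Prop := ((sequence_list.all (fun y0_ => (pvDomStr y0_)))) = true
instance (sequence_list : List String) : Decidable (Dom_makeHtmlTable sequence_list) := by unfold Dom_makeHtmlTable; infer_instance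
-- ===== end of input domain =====

-- B rebuilds each row by chunking the sequence into groups of 3 and joining the rendered
-- chunks with the separator cell (instead of A's index-modulo test inside one loop);
-- objective: alternative decomposition, same cost.

-- ===== PORT A =====
def pvColorNucleotide (nt : Char) : String :=
  if nt = 'A' then " bgcolor=\"#e6ffe6\""
  else if nt = 'C' then " bgcolor=\"#e6f3ff\""
  else if nt = 'G' then " bgcolor=\"#f2f2f2\""
  else if nt = 'T' then " bgcolor=\"#ffe6e6\""
  else if nt = 'U' then " bgcolor=\"#ffe6e6\""
  else ""

def pvMakeHtmlRow (seq : String) : String :=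
  let l := seq.toList
  (PySem.List.pyRange 0 (l.length : Int) 1).foldl
    (fun htmlrow i =>
      let htmlrow := if 0 < i ∧ PySem.Int.mod i 3 = 0 then htmlrow ++ "<td>&nbsp;,&nbsp;</td> " else htmlrow
      let nt := PySem.List.pyGetD l i ' '
      htmlrow ++ ("<td " ++ pvColorNucleotide nt ++ ">&nbsp;" ++ nt.toString ++ "&nbsp;</td> "))
    "<tr>"

def makeHtmlTable (sequence_list : List String) : String :=
  ((PySem.List.pyRange 0 5 1).foldl
    (fun table j => table ++ pvMakeHtmlRow (PySem.List.pyGetD sequence_list j ""))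
    "<table style=\"border-collapse: collapse; border: 1px solid silver;\"> <tr> ")
  ++ "</tr></table> "

-- ===== PORT B =====
def pvColors : List (Char × String) :=
  [('A', " bgcolor=\"#e6ffe6\""), ('C', " bgcolor=\"#e6f3ff\""), ('G', " bgcolor=\"#f2f2f2\""),
   ('T', " bgcolor=\"#ffe6e6\""), ('U', " bgcolor=\"#ffe6e6\"")]

def pvCell (nt : Char) : String :=
  "<td " ++ ((pvColors.lookup nt).getD "") ++ ">&nbsp;" ++ nt.toString ++ "&nbsp;</td> "

def pvRenderChunk (chunk : List Char) : String :=
  String.join (chunk.map pvCell)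

def pvChunks (l : List Char) : List (List Char) :=
  if l = [] then [] else l.take 3 :: pvChunks (l.drop 3)
termination_by l.length
decreasing_by
  rename_i h
  have : 0 < l.length := List.length_pos_of_ne_nil h
  simp [List.length_drop]; omega

def pvMakeRowAlt (seq : String) : String :=
  "<tr>" ++ PySem.Str.join "<td>&nbsp;,&nbsp;</td> " ((pvChunks seq.toList).map pvRenderChunk)

def makeHtmlTable_alt (sequence_list : List String) : String :=
  let rows := (List.range 5).map (fun j => pvMakeRowAlt (PySem.List.pyGetD sequence_list (j : Int) ""))
  "<table style=\"border-collapse: collapse; border: 1px solid silver;\"> <tr> "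
  ++ String.join rows
  ++ "</tr></table> "

-- ===== PRECONDITION & SPEC =====
-- Python A indexes sequence_list[0]..[4]; it raises IndexError when fewer than 5 sequences
-- are given, so exactly those inputs are excluded.
def Pre_makeHtmlTable (sequence_list : List String) : Prop := 5 ≤ sequence_list.length
instance (sequence_list : List String) : Decidable (Pre_makeHtmlTable sequence_list) := by
  unfold Pre_makeHtmlTable; infer_instance

def pvWitness_makeHtmlTable : List String := ["ACG", "T", "", "UXA", "GGTACC"]

def Spec_makeHtmlTable (sequence_list : List String) (out : String) : Prop := out = makeHtmlTable_alt sequence_list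
instance (sequence_list : List String) (out : String) : Decidable (Spec_makeHtmlTable sequence_list out) := by unfold Spec_makeHtmlTable; infer_instance

-- ===== CLAIM (what is proved, stated in full; the proofs are below) =====
def Claim_equal_makeHtmlTable : Prop := ∀ (sequence_list : List String), Dom_makeHtmlTable sequence_list → Pre_makeHtmlTable sequence_list → Spec_makeHtmlTable sequence_list (makeHtmlTable sequence_list)

-- ===== LEMMAS AND PROOFS =====

-- the per-element piece of A's row loop, with the separator folded in front of the cell
def pvStep (p : Int × Char) : String :=
  (if 0 < p.1 ∧ PySem.Int.mod p.1 3 = 0 then "<td>&nbsp;,&nbsp;</td> " else "") ++ pvCell p.2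

def pvSJ (xs : List (Int × Char)) : String := String.join (xs.map pvStep)

theorem join_cons (x : String) (xs : List String) :
    String.join (x :: xs) = x ++ String.join xs := by
  simp [String.join]
  induction xs generalizing x with
  | nil => simp
  | cons y t ih => simp [List.foldl_cons]; rw [ih (x ++ y), ih y, String.append_assoc]

theorem join_nil : String.join ([] : List String) = "" := rfl

theorem sj_nil : pvSJ [] = "" := rfl

theorem sj_cons (p : Int × Char) (t : List (Int × Char)) :
    pvSJ (p :: t) = pvStep p ++ pvSJ t := by
  simp [pvSJ, join_cons]

theorem cell_eq (nt : Char) :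
    "<td " ++ pvColorNucleotide nt ++ ">&nbsp;" ++ nt.toString ++ "&nbsp;</td> " = pvCell nt := by
  by_cases h1 : nt = 'A'
  · subst h1; rfl
  by_cases h2 : nt = 'C'
  · subst h2; rfl
  by_cases h3 : nt = 'G'
  · subst h3; rfl
  by_cases h4 : nt = 'T'
  · subst h4; rfl
  by_cases h5 : nt = 'U'
  · subst h5; rfl
  have e1 : (nt == 'A') = false := by simpa using h1
  have e2 : (nt == 'C') = false := by simpa using h2
  have e3 : (nt == 'G') = false := by simpa using h3
  have e4 : (nt == 'T') = false := by simpa using h4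
  have e5 : (nt == 'U') = false := by simpa using h5
  unfold pvColorNucleotide pvCell pvColors
  simp [List.lookup, e1, e2, e3, e4, e5, h1, h2, h3, h4, h5]

theorem foldl_row_eq (xs : List (Int × Char)) (acc : String) :
    xs.foldl
      (fun htmlrow p =>
        (if 0 < p.1 ∧ PySem.Int.mod p.1 3 = 0 then htmlrow ++ "<td>&nbsp;,&nbsp;</td> " else htmlrow)
        ++ ("<td " ++ pvColorNucleotide p.2 ++ ">&nbsp;" ++ p.2.toString ++ "&nbsp;</td> ")) acc
    = acc ++ pvSJ xs := by
  induction xs generalizing acc with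
  | nil => simp [sj_nil]
  | cons p t ih =>
    rw [List.foldl_cons, ih, sj_cons]
    unfold pvStep
    rw [cell_eq]
    split_ifs <;> simp [String.append_assoc]

theorem chunks_nil : pvChunks [] = [] := by rw [pvChunks]; simp

theorem chunks_cons (a : Char) (t : List Char) :
    pvChunks (a :: t) = (a :: t).take 3 :: pvChunks ((a :: t).drop 3) := by
  rw [pvChunks]; simp

theorem strjoin_nil (sep : String) : PySem.Str.join sep [] = "" := by
  apply String.toList_inj.mp
  simp [PySem.Str.toList_join, PySem.Chars.join_nil]

theorem strjoin_singleton (sep x : String) : PySem.Str.join sep [x] = x := by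
  apply String.toList_inj.mp
  simp [PySem.Str.toList_join, PySem.Chars.join_singleton]

theorem strjoin_cons (sep x : String) (xs : List String) :
    PySem.Str.join sep (x :: xs) = x ++ String.join (xs.map (fun y => sep ++ y)) := by
  induction xs generalizing x with
  | nil => simp [strjoin_singleton, join_nil]
  | cons y t ih =>
    apply String.toList_inj.mp
    have hy := congrArg String.toList (ih y)
    simp only [PySem.Str.toList_join, List.map_cons, PySem.Chars.join_cons_cons] at hy ⊢
    simp only [join_cons, String.toList_append] at hy ⊢
    rw [hy]
    simp [List.append_assoc]

theorem render_chunk_eq (a b c : Char) :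
    pvRenderChunk [a, b, c] = pvCell a ++ (pvCell b ++ pvCell c) := by
  simp [pvRenderChunk, join_cons, join_nil]

-- A's loop tail, starting at a positive index divisible by 3, renders every chunk with a
-- leading separator
theorem sj_pos (n : Nat) : ∀ (l : List Char) (s : Int), l.length ≤ n → 0 < s → PySem.Int.mod s 3 = 0 →
    pvSJ (PySem.List.enumerate l s)
      = String.join ((pvChunks l).map (fun c => "<td>&nbsp;,&nbsp;</td> " ++ pvRenderChunk c)) := by
  induction n with
  | zero =>
    intro l s hl _ _
    have : l = [] := List.eq_nil_of_length_eq_zero (by omega)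
    simp [this, PySem.List.enumerate_nil, sj_nil, chunks_nil, join_nil]
  | succ n ih =>
    intro l s hl hs hm
    match l with
    | [] => simp [PySem.List.enumerate_nil, sj_nil, chunks_nil, join_nil]
    | [a] =>
      have hc : pvChunks [a] = [[a]] := by rw [chunks_cons]; simp [chunks_nil]
      simp only [PySem.List.enumerate_cons, PySem.List.enumerate_nil, sj_cons, sj_nil, hc,
        List.map_cons, List.map_nil, join_cons, join_nil, pvStep, hs, hm]
      simp [pvRenderChunk, join_cons, join_nil]
    | [a, b] =>
      have hc : pvChunks [a, b] = [[a, b]] := by rw [chunks_cons]; simp [chunks_nil]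
      have h1 : ¬ (0 < s + 1 ∧ PySem.Int.mod (s + 1) 3 = 0) := by
        simp [PySem.Int.mod, Int.fmod_eq_emod] at hm ⊢; intro _; omega
      simp only [PySem.List.enumerate_cons, PySem.List.enumerate_nil, sj_cons, sj_nil, hc,
        List.map_cons, List.map_nil, join_cons, join_nil, pvStep, hs, hm, h1]
      simp [pvRenderChunk, join_cons, join_nil, String.append_assoc]
    | a :: b :: c :: t =>
      have hc : pvChunks (a :: b :: c :: t) = [a, b, c] :: pvChunks t := by
        rw [chunks_cons]; simp
      have h1 : ¬ (0 < s + 1 ∧ PySem.Int.mod (s + 1) 3 = 0) := by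
        simp [PySem.Int.mod, Int.fmod_eq_emod] at hm ⊢; intro _; omega
      have h2 : ¬ (0 < s + 1 + 1 ∧ PySem.Int.mod (s + 1 + 1) 3 = 0) := by
        simp [PySem.Int.mod, Int.fmod_eq_emod] at hm ⊢; intro _; omega
      have h3 : 0 < s + 1 + 1 + 1 ∧ PySem.Int.mod (s + 1 + 1 + 1) 3 = 0 := by
        simp [PySem.Int.mod, Int.fmod_eq_emod] at hm ⊢; omega
      have ht : pvSJ (PySem.List.enumerate t (s + 1 + 1 + 1))
          = String.join ((pvChunks t).map (fun c => "<td>&nbsp;,&nbsp;</td> " ++ pvRenderChunk c)) := by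
        apply ih t (s + 1 + 1 + 1)
        · simp at hl; omega
        · omega
        · exact h3.2
      simp only [PySem.List.enumerate_cons, sj_cons, pvStep, hs, hm, h1, h2, hc,
        List.map_cons, join_cons, ht, render_chunk_eq]
      simp [String.append_assoc]

-- A's index loop rewritten as a loop over (index, element) pairs
theorem foldl_range_enum (l : List Char) :
    (PySem.List.pyRange 0 (l.length : Int) 1).foldl
      (fun htmlrow i =>
        let htmlrow := if 0 < i ∧ PySem.Int.mod i 3 = 0 then htmlrow ++ "<td>&nbsp;,&nbsp;</td> " else htmlrow
        let nt := PySem.List.pyGetD l i ' '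
        htmlrow ++ ("<td " ++ pvColorNucleotide nt ++ ">&nbsp;" ++ nt.toString ++ "&nbsp;</td> ")) "<tr>"
    = (PySem.List.enumerate l 0).foldl
      (fun htmlrow p =>
        (if 0 < p.1 ∧ PySem.Int.mod p.1 3 = 0 then htmlrow ++ "<td>&nbsp;,&nbsp;</td> " else htmlrow)
        ++ ("<td " ++ pvColorNucleotide p.2 ++ ">&nbsp;" ++ p.2.toString ++ "&nbsp;</td> ")) "<tr>" := by
  rw [PySem.List.enumerate_eq_map_pyRange l ' ', List.foldl_map]
  simp [PySem.List.len]

-- A's whole row loop equals B's chunked row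
theorem row_eq (seq : String) : pvMakeHtmlRow seq = pvMakeRowAlt seq := by
  unfold pvMakeHtmlRow pvMakeRowAlt
  rw [foldl_range_enum, foldl_row_eq]
  congr 1
  match h : seq.toList with
  | [] => simp [PySem.List.enumerate_nil, sj_nil, chunks_nil, strjoin_nil]
  | [a] =>
    have hc : pvChunks [a] = [[a]] := by rw [chunks_cons]; simp [chunks_nil]
    have h0 : ¬ ((0 : Int) < 0 ∧ PySem.Int.mod 0 3 = 0) := by simp
    simp only [PySem.List.enumerate_cons, PySem.List.enumerate_nil, sj_cons, sj_nil, hc,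
      List.map_cons, List.map_nil, pvStep, h0]
    simp [strjoin_singleton, pvRenderChunk, join_cons, join_nil]
  | [a, b] =>
    have hc : pvChunks [a, b] = [[a, b]] := by rw [chunks_cons]; simp [chunks_nil]
    have h0 : ¬ ((0 : Int) < 0 ∧ PySem.Int.mod 0 3 = 0) := by simp
    have h1 : ¬ ((0 : Int) < 0 + 1 ∧ PySem.Int.mod (0 + 1) 3 = 0) := by
      simp [PySem.Int.mod, Int.fmod_eq_emod]
    simp only [PySem.List.enumerate_cons, PySem.List.enumerate_nil, sj_cons, sj_nil, hc,
      List.map_cons, List.map_nil, pvStep, h0, h1]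
    simp [strjoin_singleton, pvRenderChunk, join_cons, join_nil]
  | a :: b :: c :: t =>
    have hc : pvChunks (a :: b :: c :: t) = [a, b, c] :: pvChunks t := by
      rw [chunks_cons]; simp
    have h0 : ¬ ((0 : Int) < 0 ∧ PySem.Int.mod 0 3 = 0) := by simp
    have h1 : ¬ ((0 : Int) < 0 + 1 ∧ PySem.Int.mod (0 + 1) 3 = 0) := by
      simp [PySem.Int.mod, Int.fmod_eq_emod]
    have h2 : ¬ ((0 : Int) < 0 + 1 + 1 ∧ PySem.Int.mod (0 + 1 + 1) 3 = 0) := by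
      simp [PySem.Int.mod, Int.fmod_eq_emod]
    have ht : pvSJ (PySem.List.enumerate t (0 + 1 + 1 + 1))
        = String.join ((pvChunks t).map (fun c => "<td>&nbsp;,&nbsp;</td> " ++ pvRenderChunk c)) := by
      apply sj_pos t.length t (0 + 1 + 1 + 1) (le_refl _) (by omega)
        (by simp [PySem.Int.mod])
    rw [hc, List.map_cons, strjoin_cons]
    simp only [PySem.List.enumerate_cons, sj_cons, pvStep, h0, h1, h2, ht, render_chunk_eq]
    simp [String.append_assoc, Function.comp_def]

-- ===== VERDICT (by name: the statement is the Claim_ definition above) =====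
theorem makeHtmlTable_spec : Claim_equal_makeHtmlTable := by
  intro sequence_list _ hpre
  unfold Spec_makeHtmlTable makeHtmlTable makeHtmlTable_alt
  unfold Pre_makeHtmlTable at hpre
  match sequence_list, hpre with
  | a :: b :: c :: d :: e :: t, _ =>
    have h5 : PySem.List.pyRange 0 5 1 = [0, 1, 2, 3, 4] := by decide
    have g0 : PySem.List.pyGetD (a::b::c::d::e::t) 0 "" = a := by
      simp only [PySem.List.pyGetD, PySem.List.pyGet?, PySem.List.pyIdx?]
      rw [if_pos (show (0:Int) ≤ 0 by norm_num),
        if_pos (show (0:Int) < ↑(a::b::c::d::e::t).length by simp; omega)]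
      simp
    have g1 : PySem.List.pyGetD (a::b::c::d::e::t) 1 "" = b := by
      simp only [PySem.List.pyGetD, PySem.List.pyGet?, PySem.List.pyIdx?]
      rw [if_pos (show (0:Int) ≤ 1 by norm_num),
        if_pos (show (1:Int) < ↑(a::b::c::d::e::t).length by simp; omega)]
      simp
    have g2 : PySem.List.pyGetD (a::b::c::d::e::t) 2 "" = c := by
      simp only [PySem.List.pyGetD, PySem.List.pyGet?, PySem.List.pyIdx?]
      rw [if_pos (show (0:Int) ≤ 2 by norm_num),
        if_pos (show (2:Int) < ↑(a::b::c::d::e::t).length by simp; omega)]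
      simp
    have g3 : PySem.List.pyGetD (a::b::c::d::e::t) 3 "" = d := by
      simp only [PySem.List.pyGetD, PySem.List.pyGet?, PySem.List.pyIdx?]
      rw [if_pos (show (0:Int) ≤ 3 by norm_num),
        if_pos (show (3:Int) < ↑(a::b::c::d::e::t).length by simp; omega)]
      simp
    have g4 : PySem.List.pyGetD (a::b::c::d::e::t) 4 "" = e := by
      simp only [PySem.List.pyGetD, PySem.List.pyGet?, PySem.List.pyIdx?]
      rw [if_pos (show (0:Int) ≤ 4 by norm_num),
        if_pos (show (4:Int) < ↑(a::b::c::d::e::t).length by simp; omega)]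
      simp
    have hr5 : List.range 5 = [0, 1, 2, 3, 4] := by decide
    rw [h5, hr5]
    simp only [List.foldl_cons, List.foldl_nil, row_eq]
    simp [join_cons, join_nil, g0, g1, g2, g3, g4, String.append_assoc]
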